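-- pv_equiv track=rewrite | github.com/twishabansal/WTEF-cpp | Python/Homework/pick10.py | pick10
-- ===== SOURCE A (Python) =====
-- def pick10(s: str, n: int):
--     c = s[n]
--     r = n
--     i = 1
--     while i < 10:
--         r += i
--         c += s[r % len(s)]
--         i += 1
--     return c
-- ===== SOURCE B (Python) =====
-- def pick10(s: str, n: int):
--     first = s[n]
--     base = n % len(s)
--     window = (s * (45 // len(s) + 2))[base : base + 46]
--     return (first + window[1] + window[3] + window[6] + window[10]
--             + window[15] + window[21] + window[28] + window[36] + window[45])
-- ===== Notes on version B (the rewrite author's own statement) =====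
-- stated objective: alternative
-- what changed: Replaced the while-loop with its running accumulator r and per-step modular indexing by a tiled-string approach: tile s enough times, cut one 46-character window starting at n % len(s), and read the nine characters at the fixed offsets 1,3,6,10,15,21,28,36,45 of that window (no mod per character, no threaded state).
import Mathlib
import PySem

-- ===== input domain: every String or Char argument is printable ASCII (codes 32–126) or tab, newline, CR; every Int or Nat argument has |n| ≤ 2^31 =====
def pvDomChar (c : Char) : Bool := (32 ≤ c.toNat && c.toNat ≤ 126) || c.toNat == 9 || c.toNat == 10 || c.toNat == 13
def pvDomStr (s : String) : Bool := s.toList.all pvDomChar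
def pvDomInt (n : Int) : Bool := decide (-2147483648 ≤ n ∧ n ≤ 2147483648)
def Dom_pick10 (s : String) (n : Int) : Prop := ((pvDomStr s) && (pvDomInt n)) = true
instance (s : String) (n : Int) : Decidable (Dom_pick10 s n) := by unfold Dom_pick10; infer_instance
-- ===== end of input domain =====

-- B replaces A's accumulator loop with modular indexing by a tiled copy of the
-- string: it slices one 46-character window out of s repeated enough times and
-- reads the nine characters at fixed offsets 1,3,6,…,45 of that window
-- (objective: alternative — no per-character mod, no running state).

-- ===== PORT A =====
-- while-loop over i = 1..9, state (c, r); s[r % len(s)] via pyGetD (mod is in range since len > 0 under Pre_)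
def pick10 (s : String) (n : Int) : String :=
  match PySem.Str.pyGet? s n with
  | none => ""   -- s[n] raises IndexError: excluded by Pre_pick10
  | some ch =>
    let st := (PySem.List.pyRange 1 10 1).foldl
      (fun (st : List Char × Int) i =>
        let r := st.2 + i
        (st.1 ++ [PySem.List.pyGetD s.toList (PySem.Int.mod r (s.toList.length : Int)) 'A'], r))
      ([ch], n)
    String.ofList st.1

-- ===== PORT B =====
-- first = s[n]; window = (s * (45 // len(s) + 2))[base : base + 46]; then the
-- fixed positions 1,3,6,10,15,21,28,36,45 of the window (window[t] is in range
-- under Pre_pick10, so pyGetD is exact there).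
def pick10_alt (s : String) (n : Int) : String :=
  match PySem.Str.pyGet? s n with
  | none => ""   -- s[n] raises IndexError: excluded by Pre_pick10
  | some first =>
    String.ofList (first ::
      [PySem.List.pyGetD (PySem.List.slice (PySem.List.pyRepeat s.toList (PySem.Int.floordiv 45 (s.toList.length : Int) + 2)) (some (PySem.Int.mod n (s.toList.length : Int))) (some (PySem.Int.mod n (s.toList.length : Int) + 46))) 1 'A',
       PySem.List.pyGetD (PySem.List.slice (PySem.List.pyRepeat s.toList (PySem.Int.floordiv 45 (s.toList.length : Int) + 2)) (some (PySem.Int.mod n (s.toList.length : Int))) (some (PySem.Int.mod n (s.toList.length : Int) + 46))) 3 'A',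
       PySem.List.pyGetD (PySem.List.slice (PySem.List.pyRepeat s.toList (PySem.Int.floordiv 45 (s.toList.length : Int) + 2)) (some (PySem.Int.mod n (s.toList.length : Int))) (some (PySem.Int.mod n (s.toList.length : Int) + 46))) 6 'A',
       PySem.List.pyGetD (PySem.List.slice (PySem.List.pyRepeat s.toList (PySem.Int.floordiv 45 (s.toList.length : Int) + 2)) (some (PySem.Int.mod n (s.toList.length : Int))) (some (PySem.Int.mod n (s.toList.length : Int) + 46))) 10 'A',
       PySem.List.pyGetD (PySem.List.slice (PySem.List.pyRepeat s.toList (PySem.Int.floordiv 45 (s.toList.length : Int) + 2)) (some (PySem.Int.mod n (s.toList.length : Int))) (some (PySem.Int.mod n (s.toList.length : Int) + 46))) 15 'A',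
       PySem.List.pyGetD (PySem.List.slice (PySem.List.pyRepeat s.toList (PySem.Int.floordiv 45 (s.toList.length : Int) + 2)) (some (PySem.Int.mod n (s.toList.length : Int))) (some (PySem.Int.mod n (s.toList.length : Int) + 46))) 21 'A',
       PySem.List.pyGetD (PySem.List.slice (PySem.List.pyRepeat s.toList (PySem.Int.floordiv 45 (s.toList.length : Int) + 2)) (some (PySem.Int.mod n (s.toList.length : Int))) (some (PySem.Int.mod n (s.toList.length : Int) + 46))) 28 'A',
       PySem.List.pyGetD (PySem.List.slice (PySem.List.pyRepeat s.toList (PySem.Int.floordiv 45 (s.toList.length : Int) + 2)) (some (PySem.Int.mod n (s.toList.length : Int))) (some (PySem.Int.mod n (s.toList.length : Int) + 46))) 36 'A',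
       PySem.List.pyGetD (PySem.List.slice (PySem.List.pyRepeat s.toList (PySem.Int.floordiv 45 (s.toList.length : Int) + 2)) (some (PySem.Int.mod n (s.toList.length : Int))) (some (PySem.Int.mod n (s.toList.length : Int) + 46))) 45 'A'])

-- ===== PRECONDITION & SPEC =====
-- Pre_: exactly the inputs on which A returns (s[n] raises IndexError when n is out of range, which also forces len(s) > 0 for the % len(s))
def Pre_pick10 (s : String) (n : Int) : Prop := PySem.Raise.InRange s.toList.length n
instance (s : String) (n : Int) : Decidable (Pre_pick10 s n) := by unfold Pre_pick10; infer_instance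
def pvWitness_pick10 : String × Int := ("abcdefgh", 2)
def Spec_pick10 (s : String) (n : Int) (out : String) : Prop := out = pick10_alt s n
instance (s : String) (n : Int) (out : String) : Decidable (Spec_pick10 s n out) := by unfold Spec_pick10; infer_instance

-- ===== CLAIM (what is proved, stated in full; the proofs are below) =====
def Claim_equal_pick10 : Prop := ∀ (s : String) (n : Int), Dom_pick10 s n → Pre_pick10 s n → Spec_pick10 s n (pick10 s n)

-- ===== LEMMAS AND PROOFS =====
lemma flatten_replicate_getElem? {α : Type} (l : List α) (m i : Nat) (h : i < m * l.length) :
    (List.replicate m l).flatten[i]? = l[i % l.length]? := by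
  induction m generalizing i with
  | zero => omega
  | succ m ih =>
    have hL : 0 < l.length := by
      rcases Nat.eq_zero_or_pos l.length with h0 | h0
      · rw [h0, Nat.mul_zero] at h; omega
      · exact h0
    rw [List.replicate_succ, List.flatten_cons]
    by_cases hi : i < l.length
    · rw [List.getElem?_append_left hi, Nat.mod_eq_of_lt hi]
    · rw [List.getElem?_append_right (Nat.le_of_not_lt hi),
        ih (i - l.length) (by rw [Nat.add_mul, Nat.one_mul] at h; omega), Nat.mod_eq_sub_mod (Nat.le_of_not_lt hi)]

lemma pick10_window_get (l : List Char) (n t : Int) (hl : l ≠ []) (ht0 : 0 ≤ t) (ht : t ≤ 45) :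
    PySem.List.pyGetD
      (PySem.List.slice (PySem.List.pyRepeat l (PySem.Int.floordiv 45 (l.length : Int) + 2))
        (some (PySem.Int.mod n (l.length : Int))) (some (PySem.Int.mod n (l.length : Int) + 46))) t 'A'
    = PySem.List.pyGetD l (PySem.Int.mod (n + t) (l.length : Int)) 'A' := by
  have hL : 0 < l.length := List.length_pos_iff.mpr hl
  have hLI : (0 : Int) < (l.length : Int) := by exact_mod_cast hL
  rw [PySem.Int.mod_eq_emod_of_pos hLI, PySem.Int.mod_eq_emod_of_pos hLI,
    PySem.Int.floordiv_eq_ediv_of_pos hLI]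
  have hb0 : 0 ≤ n % (l.length : Int) := Int.emod_nonneg n (ne_of_gt hLI)
  have hbL : n % (l.length : Int) < (l.length : Int) := Int.emod_lt_of_pos n hLI
  obtain ⟨bn, hbn⟩ : ∃ bn : Nat, n % (l.length : Int) = (bn : Int) :=
    ⟨(n % (l.length : Int)).toNat, (Int.toNat_of_nonneg hb0).symm⟩
  obtain ⟨tn, htn⟩ : ∃ tn : Nat, t = (tn : Int) := ⟨t.toNat, (Int.toNat_of_nonneg ht0).symm⟩
  have hbnL : bn < l.length := by exact_mod_cast hbn ▸ hbL
  have htn45 : tn ≤ 45 := by exact_mod_cast htn ▸ ht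
  have hmod : (n + t) % (l.length : Int) = (((bn + tn) % l.length : Nat) : Int) := by
    have h1 : ((bn : Int)) % (l.length : Int) = n % (l.length : Int) := by
      rw [hbn]; exact Int.emod_eq_of_lt (by positivity) (by exact_mod_cast hbnL)
    calc (n + t) % (l.length : Int) = ((bn : Int) + (tn : Int)) % (l.length : Int) := by
          rw [htn, Int.add_emod n, Int.add_emod ((bn : Int)), h1]
      _ = (((bn + tn) % l.length : Nat) : Int) := by push_cast; ring
  rw [hmod, PySem.List.pyGetD_natCast]
  have hext : PySem.List.pyRepeat l (45 / (l.length : Int) + 2)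
      = (List.replicate (45 / l.length + 2) l).flatten := by
    have hm : (45 / (l.length : Int) + 2) = ((45 / l.length + 2 : Nat) : Int) := by
      push_cast [Int.natCast_div]; ring
    rw [hm]; rfl
  rw [hbn, htn, hext,
    show ((bn : Int) + 46) = ((bn + 46 : Nat) : Int) by push_cast; ring,
    PySem.List.slice_natCast, PySem.List.pyGetD_natCast,
    show bn + 46 - bn = 46 from by omega]
  have hbound : bn + tn < (45 / l.length + 2) * l.length := by
    have := Nat.div_add_mod 45 l.length
    have := Nat.mod_lt 45 hL
    nlinarith
  rw [List.getD_eq_getElem?_getD, List.getD_eq_getElem?_getD, List.getElem?_take,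
    if_pos (by omega : tn < 46), List.getElem?_drop, flatten_replicate_getElem? l _ _ hbound]

-- ===== VERDICT (by name: the statement is the Claim_ definition above) =====
theorem pick10_spec : Claim_equal_pick10 := by
  intro s n _ hpre
  unfold Spec_pick10 pick10 pick10_alt
  cases h : PySem.Str.pyGet? s n with
  | none =>
    exact absurd hpre (by simpa [PySem.Str.pyGet?, PySem.List.pyGet?_eq_none_iff] using h)
  | some ch =>
    have hl : s.toList ≠ [] := by
      intro h0
      have h1 : s.toList.length = 0 := by rw [h0]; rfl
      have h2 := hpre
      unfold Pre_pick10 PySem.Raise.InRange at h2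
      rw [h1] at h2
      omega
    simp only [show PySem.List.pyRange 1 10 1 = [1,2,3,4,5,6,7,8,9] from by decide, List.foldl]
    rw [pick10_window_get s.toList n 1 hl (by norm_num) (by norm_num),
        pick10_window_get s.toList n 3 hl (by norm_num) (by norm_num),
        pick10_window_get s.toList n 6 hl (by norm_num) (by norm_num),
        pick10_window_get s.toList n 10 hl (by norm_num) (by norm_num),
        pick10_window_get s.toList n 15 hl (by norm_num) (by norm_num),
        pick10_window_get s.toList n 21 hl (by norm_num) (by norm_num),
        pick10_window_get s.toList n 28 hl (by norm_num) (by norm_num),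
        pick10_window_get s.toList n 36 hl (by norm_num) (by norm_num),
        pick10_window_get s.toList n 45 hl (by norm_num) (by norm_num)]
    norm_num
    ring_nf
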